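-- pv_equiv track=rewrite | github.com/pazbenitzhak/LyricsToChordsGenerator | chord_critic.py | _calc_score_subset
-- ===== SOURCE A (Python) =====
-- def find_all_sublist(target: list, pattern: list):
--     if len(pattern) > len(target):
--         return []
--
--     all_occurences = [i for i in range(len(target) - len(pattern) + 1)
--                         if pattern == target[i : i + len(pattern)]]
--     return all_occurences
--
-- def _calc_score_subset(functions, progressions, functions_used_maps):
--     best_used_map = functions_used_maps
--     if len(functions) <= 1:
--         return functions_used_maps
--
--     for prog in progressions:
--         for occurence_i in find_all_sublist(functions, prog):
--             best_used_map = best_used_map[: occurence_i] + ([True] * len(prog)) + best_used_map[occurence_i + len(prog) :]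
--         pass
--     return best_used_map
-- ===== SOURCE B (Python) =====
-- def _calc_score_subset(functions, progressions, functions_used_maps):
--     if len(functions) <= 1:
--         return functions_used_maps
--     n = len(functions)
--     out = []
--     remaining = 0
--     for i in range(n):
--         for p in progressions:
--             if len(p) > remaining and functions[i:i + len(p)] == p:
--                 remaining = len(p)
--         out.append(remaining > 0 or functions_used_maps[i])
--         remaining = max(remaining - 1, 0)
--     return out + functions_used_maps[n:]
-- ===== Notes on version B (the rewrite author's own statement) =====
-- stated objective: faster
-- what changed: A collects all occurrence start indices per pattern and rebuilds the whole map by list-slice concatenation for every occurrence; B makes one left-to-right sweep over positions carrying a 'remaining covered span' counter (max pattern length still matching at-or-before here, decremented each step), emitting each output bit front-to-back with no occurrence lists and no per-occurrence list rebuild.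
-- outside the precondition, e.g. on _calc_score_subset(['a', 'b'], [], []): A returns [], B raises IndexError
import Mathlib
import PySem

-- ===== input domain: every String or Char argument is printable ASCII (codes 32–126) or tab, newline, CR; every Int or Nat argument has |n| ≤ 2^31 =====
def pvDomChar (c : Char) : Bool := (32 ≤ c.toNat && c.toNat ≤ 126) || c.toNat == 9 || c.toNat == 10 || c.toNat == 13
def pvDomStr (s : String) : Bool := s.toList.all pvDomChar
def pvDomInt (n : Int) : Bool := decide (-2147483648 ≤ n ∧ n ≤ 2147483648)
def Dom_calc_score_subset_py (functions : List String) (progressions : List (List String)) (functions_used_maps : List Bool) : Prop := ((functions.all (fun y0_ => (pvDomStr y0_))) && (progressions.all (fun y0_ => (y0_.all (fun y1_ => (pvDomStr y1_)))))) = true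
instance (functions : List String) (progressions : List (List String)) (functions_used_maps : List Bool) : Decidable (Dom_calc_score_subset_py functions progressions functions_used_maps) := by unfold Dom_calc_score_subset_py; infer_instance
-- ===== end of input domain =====

-- B replaces A's occurrence-list collection and per-occurrence list-slice reconstruction by a single
-- left-to-right sweep carrying a "remaining covered span" counter, emitting the output front-to-back
-- (objective: faster, measured; return-value equivalence on maps at least as long as `functions`).

-- ===== PORT A =====
def find_all_sublist_py (target : List String) (pattern : List String) : List Int :=
  if pattern.length > target.length then []
  else (PySem.List.pyRange 0 ((target.length : Int) - (pattern.length : Int) + 1) 1).filter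
    (fun i => pattern == PySem.List.slice target (some i) (some (i + (pattern.length : Int))))

def calc_score_subset_py (functions : List String) (progressions : List (List String)) (functions_used_maps : List Bool) : List Bool :=
  let best_used_map := functions_used_maps
  if functions.length ≤ 1 then functions_used_maps
  else
    progressions.foldl (fun best prog =>
      (find_all_sublist_py functions prog).foldl (fun best i =>
        PySem.List.slice best none (some i) ++ List.replicate prog.length true ++
          PySem.List.slice best (some (i + (prog.length : Int))) none) best) best_used_map

-- ===== PORT B =====
-- Python's `remaining > 0 or functions_used_maps[i]` only evaluates the index when needed; the port
-- reads it through pyGet? with default false — under Pre_ the index is always in range (no IndexError).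
def calc_score_subset_py_alt (functions : List String) (progressions : List (List String)) (functions_used_maps : List Bool) : List Bool :=
  if functions.length ≤ 1 then functions_used_maps
  else
    let n : Int := (functions.length : Int)
    let res := (PySem.List.pyRange 0 n 1).foldl (fun (st : List Bool × Int) i =>
      let r := progressions.foldl (fun r p =>
        if ((p.length : Int) > r) ∧
            PySem.List.slice functions (some i) (some (i + (p.length : Int))) = p
        then (p.length : Int) else r) st.2
      (st.1 ++ [decide (0 < r) || (PySem.List.pyGet? functions_used_maps i).getD false],
       max (r - 1) 0)) (([] : List Bool), (0 : Int))
    res.1 ++ PySem.List.slice functions_used_maps (some n) none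

-- ===== PRECONDITION & SPEC =====
-- Pre_ excludes malformed inputs whose coverage map is shorter than `functions` (with ≥ 2 functions):
-- there A's slice concatenation silently pads past the map's end, while B's natural per-position read
-- of the map raises IndexError at the first uncovered position, so they lie outside the natural domain.
def Pre_calc_score_subset_py (functions : List String) (progressions : List (List String)) (functions_used_maps : List Bool) : Prop :=
  functions.length ≤ 1 ∨ functions.length ≤ functions_used_maps.length
instance (functions : List String) (progressions : List (List String)) (functions_used_maps : List Bool) : Decidable (Pre_calc_score_subset_py functions progressions functions_used_maps) := by unfold Pre_calc_score_subset_py; infer_instance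

def pvWitness_calc_score_subset_py : List String × List (List String) × List Bool :=
  (["t", "s", "d", "t"], [["s", "d"], ["d", "t"]], [false, true, false, false])

def Spec_calc_score_subset_py (functions : List String) (progressions : List (List String)) (functions_used_maps : List Bool) (out : List Bool) : Prop := out = calc_score_subset_py_alt functions progressions functions_used_maps
instance (functions : List String) (progressions : List (List String)) (functions_used_maps : List Bool) (out : List Bool) : Decidable (Spec_calc_score_subset_py functions progressions functions_used_maps out) := by unfold Spec_calc_score_subset_py; infer_instance

-- ===== CLAIM (what is proved, stated in full; the proofs are below) =====
def Claim_equal_calc_score_subset_py : Prop := ∀ (functions : List String) (progressions : List (List String)) (functions_used_maps : List Bool), Dom_calc_score_subset_py functions progressions functions_used_maps → Pre_calc_score_subset_py functions progressions functions_used_maps → Spec_calc_score_subset_py functions progressions functions_used_maps (calc_score_subset_py functions progressions functions_used_maps)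

-- ===== LEMMAS AND PROOFS =====

-- pvOcc fns p i: pattern p matches fns at start position i (wholly inside fns).
def pvOcc (fns p : List String) (i : Nat) : Bool :=
  decide (i + p.length ≤ fns.length ∧ (fns.drop i).take p.length = p)

-- pvCov fns ps j: position j is covered by some occurrence of some progression.
def pvCov (fns : List String) (ps : List (List String)) (j : Nat) : Bool :=
  ps.any (fun p => (List.range (j+1)).any (fun i => pvOcc fns p i && decide (j < i + p.length)))

-- pvGain i j: for each progression matching at i, how far past position j its span reaches (i+m-j).
def pvGain (fns : List String) (ps : List (List String)) (i j : Nat) : List Int :=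
  ps.filterMap (fun p => if pvOcc fns p i then some ((i : Int) + p.length - j) else none)

-- pvReach j: B's carry counter before processing position j.
def pvReach (fns : List String) (ps : List (List String)) (j : Nat) : Int :=
  ((List.range j).flatMap (fun i => pvGain fns ps i j)).foldl max 0

theorem pvExt (x y : List Bool) (h1 : x.length = y.length)
    (h2 : ∀ j, x.getD j false = y.getD j false) : x = y := by
  apply List.ext_getElem h1
  intro j hj hj'
  have := h2 j
  rwa [List.getD_eq_getElem x false hj, List.getD_eq_getElem y false hj'] at this

-- pvMark b i m = b with positions [i, i+m) overwritten by true (A's slice reconstruction step).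
def pvMark (b : List Bool) (i m : Nat) : List Bool :=
  b.take i ++ List.replicate m true ++ b.drop (i + m)

theorem pvMark_length (b : List Bool) (i m : Nat) (h : i + m ≤ b.length) :
    (pvMark b i m).length = b.length := by
  simp [pvMark]; omega

theorem pvMark_getD (b : List Bool) (i m : Nat) (h : i + m ≤ b.length) (j : Nat) :
    (pvMark b i m).getD j false = if i ≤ j ∧ j < i + m then true else b.getD j false := by
  have hlen : i ≤ b.length := by omega
  have hlt : (b.take i).length = i := by simp [Nat.min_eq_left hlen]
  have hlr : (b.take i ++ List.replicate m (true : Bool)).length = i + m := by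
    simp [Nat.min_eq_left hlen]
  simp only [pvMark, List.getD_eq_getElem?_getD]
  by_cases h1 : j < i
  · rw [List.getElem?_append_left (by omega : j < (b.take i ++ List.replicate m (true:Bool)).length),
        List.getElem?_append_left (by omega : j < (b.take i).length), List.getElem?_take,
        if_pos h1, if_neg (by omega)]
  · by_cases h2 : j < i + m
    · rw [List.getElem?_append_left (by omega : j < (b.take i ++ List.replicate m (true:Bool)).length),
          List.getElem?_append_right (by omega : (b.take i).length ≤ j),
          List.getElem?_replicate, hlt, if_pos (by omega), if_pos (by omega)]
      rfl
    · rw [List.getElem?_append_right (by omega : (b.take i ++ List.replicate m (true:Bool)).length ≤ j),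
          List.getElem?_drop, hlr, if_neg (by omega)]
      congr 2
      omega

-- A's per-occurrence slice reconstruction is pvMark.
theorem pv_aop_eq_mark (b : List Bool) (i : Int) (m : Nat) (hi : 0 ≤ i) :
    PySem.List.slice b none (some i) ++ List.replicate m true ++
        PySem.List.slice b (some (i + (m : Int))) none
      = pvMark b i.toNat m := by
  rw [PySem.List.slice_to b hi, PySem.List.slice_from b (by omega),
      show (i + (m : Int)).toNat = i.toNat + m by omega]
  rfl

-- membership in A's occurrence list.
theorem pv_mem_find (fns p : List String) (x : Int) :
    x ∈ find_all_sublist_py fns p ↔ 0 ≤ x ∧ pvOcc fns p x.toNat = true := by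
  unfold find_all_sublist_py
  by_cases hbig : p.length > fns.length
  · rw [if_pos hbig]
    simp only [List.not_mem_nil, false_iff, not_and]
    intro _ hocc
    simp only [pvOcc, decide_eq_true_eq] at hocc
    omega
  · rw [if_neg hbig, List.mem_filter, PySem.List.mem_pyRange_one]
    constructor
    · rintro ⟨⟨hx0, hx1⟩, hm⟩
      refine ⟨hx0, ?_⟩
      rw [PySem.List.slice_toNat fns hx0 (by omega),
          show (x + (p.length : Int)).toNat - x.toNat = p.length by omega] at hm
      simp only [beq_iff_eq] at hm
      simp only [pvOcc, decide_eq_true_eq]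
      exact ⟨by omega, hm.symm⟩
    · rintro ⟨hx0, hocc⟩
      simp only [pvOcc, decide_eq_true_eq] at hocc
      refine ⟨⟨hx0, by omega⟩, ?_⟩
      rw [PySem.List.slice_toNat fns hx0 (by omega),
          show (x + (p.length : Int)).toNat - x.toNat = p.length by omega]
      simp only [beq_iff_eq]
      exact hocc.2.symm

-- folding pvMark over a list of in-range start positions: length and pointwise value.
theorem pv_markfold_length (m : Nat) (is : List Int) (b : List Bool)
    (h : ∀ i ∈ is, 0 ≤ i ∧ i.toNat + m ≤ b.length) :
    (is.foldl (fun b i => pvMark b i.toNat m) b).length = b.length := by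
  induction is generalizing b with
  | nil => rfl
  | cons i0 is ih =>
    obtain ⟨h0, h1⟩ := h i0 (by simp)
    simp only [List.foldl_cons]
    rw [ih (pvMark b i0.toNat m)
          (fun i hi => by rw [pvMark_length b _ _ (by omega)]; exact h i (by simp [hi])),
        pvMark_length b _ _ (by omega)]

theorem pv_markfold_getD (m : Nat) (is : List Int) (b : List Bool)
    (h : ∀ i ∈ is, 0 ≤ i ∧ i.toNat + m ≤ b.length) (j : Nat) :
    (is.foldl (fun b i => pvMark b i.toNat m) b).getD j false
      = (b.getD j false || is.any (fun i => decide (i.toNat ≤ j ∧ j < i.toNat + m))) := by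
  induction is generalizing b with
  | nil => simp
  | cons i0 is ih =>
    obtain ⟨h0, h1⟩ := h i0 (by simp)
    simp only [List.foldl_cons, List.any_cons]
    rw [ih (pvMark b i0.toNat m)
          (fun i hi => by rw [pvMark_length b _ _ (by omega)]; exact h i (by simp [hi])),
        pvMark_getD b _ _ (by omega) j]
    split_ifs with hc
    · simp [hc]
    · by_cases ha : i0 ≤ (j : Int)
      · have hb : ¬ j < i0.toNat + m := by omega
        simp [hb]
      · simp [ha]

-- the two "some occurrence of p covers j" tests agree.
theorem pv_occany (fns p : List String) (j : Nat) :
    (find_all_sublist_py fns p).any (fun i => decide (i.toNat ≤ j ∧ j < i.toNat + p.length))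
      = (List.range (j+1)).any (fun i => pvOcc fns p i && decide (j < i + p.length)) := by
  rw [Bool.eq_iff_iff]
  simp only [List.any_eq_true, decide_eq_true_eq, Bool.and_eq_true, List.mem_range, pv_mem_find]
  constructor
  · rintro ⟨i, ⟨hi0, hocc⟩, hij, hjm⟩
    exact ⟨i.toNat, by omega, hocc, hjm⟩
  · rintro ⟨i, hij, hocc, hjm⟩
    exact ⟨(i : Int), ⟨by omega, by simpa using hocc⟩, by simp; omega⟩

-- pointwise characterization of A's progression fold.
theorem pv_progfold (fns : List String) (ps : List (List String)) (b : List Bool)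
    (hb : fns.length ≤ b.length) :
    (ps.foldl (fun best prog =>
        (find_all_sublist_py fns prog).foldl (fun best i =>
          PySem.List.slice best none (some i) ++ List.replicate prog.length true ++
            PySem.List.slice best (some (i + (prog.length : Int))) none) best) b).length = b.length
    ∧ ∀ j, (ps.foldl (fun best prog =>
        (find_all_sublist_py fns prog).foldl (fun best i =>
          PySem.List.slice best none (some i) ++ List.replicate prog.length true ++
            PySem.List.slice best (some (i + (prog.length : Int))) none) best) b).getD j false
      = (b.getD j false || pvCov fns ps j) := by
  induction ps generalizing b with
  | nil => simp [pvCov]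
  | cons p ps ih =>
    have hmem : ∀ i ∈ find_all_sublist_py fns p, 0 ≤ i ∧ i.toNat + p.length ≤ b.length := by
      intro i hi
      obtain ⟨hi0, hocc⟩ := (pv_mem_find fns p i).mp hi
      simp only [pvOcc, decide_eq_true_eq] at hocc
      exact ⟨hi0, by omega⟩
    have hstep : (find_all_sublist_py fns p).foldl (fun best i =>
          PySem.List.slice best none (some i) ++ List.replicate p.length true ++
            PySem.List.slice best (some (i + (p.length : Int))) none) b
        = (find_all_sublist_py fns p).foldl (fun b i => pvMark b i.toNat p.length) b := by
      apply PySem.List.foldl_congr_mem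
      intro acc i hi
      exact pv_aop_eq_mark acc i p.length ((pv_mem_find fns p i).mp hi).1
    simp only [List.foldl_cons]
    rw [hstep]
    have hlen2 : ∀ i ∈ find_all_sublist_py fns p,
        0 ≤ i ∧ i.toNat + p.length ≤ b.length := hmem
    have hL := pv_markfold_length p.length _ b hlen2
    obtain ⟨ihL, ihD⟩ := ih ((find_all_sublist_py fns p).foldl (fun b i => pvMark b i.toNat p.length) b)
      (by rw [hL]; exact hb)
    refine ⟨by rw [ihL, hL], ?_⟩
    intro j
    rw [ihD j, pv_markfold_getD p.length _ b hlen2 j, pv_occany fns p j]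
    simp [pvCov, Bool.or_assoc]

-- a match of p at the slice starting at j equals pvOcc (for j inside fns).
theorem pv_slice_occ (fns p : List String) (j : Nat) (hj : j < fns.length) :
    (PySem.List.slice fns (some (j : Int)) (some ((j : Int) + (p.length : Int))) = p)
      ↔ pvOcc fns p j = true := by
  rw [PySem.List.slice_toNat fns (by positivity) (by positivity),
      show ((j : Int) + (p.length : Int)).toNat - (j : Int).toNat = p.length by omega,
      show ((j : Int)).toNat = j by omega]
  simp only [pvOcc, decide_eq_true_eq]
  constructor
  · intro h
    have hlen := congrArg List.length h
    simp only [List.length_take, List.length_drop] at hlen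
    exact ⟨by omega, h⟩
  · exact fun h => h.2

-- B's inner progression fold computes the running max of the span lengths matching at j.
theorem pv_inner (fns : List String) (ps : List (List String)) (j : Nat) (hj : j < fns.length)
    (r0 : Int) :
    ps.foldl (fun r p =>
        if ((p.length : Int) > r) ∧
            PySem.List.slice fns (some ((j : Int))) (some ((j : Int) + (p.length : Int))) = p
        then (p.length : Int) else r) r0
      = (pvGain fns ps j j).foldl max r0 := by
  induction ps generalizing r0 with
  | nil => rfl
  | cons p ps ih =>
    simp only [List.foldl_cons]
    by_cases hocc : pvOcc fns p j = true
    · have hg : pvGain fns (p :: ps) j j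
          = ((j : Int) + p.length - (j : Int)) :: pvGain fns ps j j := by
        simp [pvGain, hocc]
      rw [hg, List.foldl_cons]
      have h1 : (if ((p.length : Int) > r0) ∧
            PySem.List.slice fns (some ((j : Int))) (some ((j : Int) + (p.length : Int))) = p
          then (p.length : Int) else r0) = max r0 ((j : Int) + (p.length : Int) - (j : Int)) := by
        rw [show (j : Int) + (p.length : Int) - (j : Int) = (p.length : Int) by ring]
        split_ifs with hc
        · obtain ⟨hgt, -⟩ := hc
          omega
        · rw [not_and_or] at hc
          rcases hc with hc | hc
          · omega
          · exact absurd ((pv_slice_occ fns p j hj).mpr hocc) hc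
      rw [h1]
      exact ih _
    · have hg : pvGain fns (p :: ps) j j = pvGain fns ps j j := by
        simp [pvGain, hocc]
      rw [hg]
      have h1 : (if ((p.length : Int) > r0) ∧
            PySem.List.slice fns (some ((j : Int))) (some ((j : Int) + (p.length : Int))) = p
          then (p.length : Int) else r0) = r0 := by
        rw [if_neg]
        rintro ⟨-, hsl⟩
        exact hocc ((pv_slice_occ fns p j hj).mp hsl)
      rw [h1]
      exact ih _

-- the value of B's counter after the inner fold at position j, as a single max over all i ≤ j.
theorem pv_reach_incl (fns : List String) (ps : List (List String)) (j : Nat) :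
    (pvGain fns ps j j).foldl max (pvReach fns ps j)
      = ((List.range (j+1)).flatMap (fun i => pvGain fns ps i j)).foldl max 0 := by
  rw [List.range_succ, List.flatMap_append, List.foldl_append]
  simp [pvReach]

theorem pv_foldmax_sub_one (l : List Int) (a : Int) :
    (l.map (fun x => x - 1)).foldl max (max (a - 1) 0) = max ((l.foldl max a) - 1) 0 := by
  induction l generalizing a with
  | nil => rfl
  | cons x l ih =>
    simp only [List.map_cons, List.foldl_cons]
    rw [show max (max (a - 1) 0) (x - 1) = max ((max a x) - 1) 0 by omega]
    exact ih (max a x)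

-- stepping the counter: decrement-and-clamp moves pvReach to the next position.
theorem pv_reach_succ (fns : List String) (ps : List (List String)) (j : Nat) :
    pvReach fns ps (j+1) = max ((pvGain fns ps j j).foldl max (pvReach fns ps j) - 1) 0 := by
  rw [pv_reach_incl]
  have hgain : ∀ i : Nat, pvGain fns ps i (j+1) = (pvGain fns ps i j).map (fun x => x - 1) := by
    intro i
    simp only [pvGain, List.map_filterMap]
    congr 1
    funext p
    split_ifs with h
    · simp only [Option.map_some]
      congr 1
      push_cast
      ring
    · rfl
  have hflat : (List.range (j+1)).flatMap (fun i => pvGain fns ps i (j+1))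
      = ((List.range (j+1)).flatMap (fun i => pvGain fns ps i j)).map (fun x => x - 1) := by
    rw [List.map_flatMap]
    exact List.flatMap_congr (fun i _ => hgain i)
  rw [pvReach, hflat]
  have h := pv_foldmax_sub_one ((List.range (j+1)).flatMap (fun i => pvGain fns ps i j)) 0
  rw [show max ((0 : Int) - 1) 0 = 0 by omega] at h
  exact h

theorem pv_foldmax_pos (l : List Int) (a : Int) :
    0 < l.foldl max a ↔ 0 < a ∨ ∃ x ∈ l, 0 < x := by
  induction l generalizing a with
  | nil => simp
  | cons x l ih =>
    rw [List.foldl_cons, ih (max a x)]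
    constructor
    · rintro (h | ⟨y, hy, hpos⟩)
      · rcases (by omega : 0 < a ∨ 0 < x) with h' | h'
        · exact Or.inl h'
        · exact Or.inr ⟨x, List.mem_cons_self .., h'⟩
      · exact Or.inr ⟨y, List.mem_cons_of_mem x hy, hpos⟩
    · rintro (h | ⟨y, hy, hpos⟩)
      · exact Or.inl (by omega)
      · rcases List.mem_cons.mp hy with rfl | hy'
        · exact Or.inl (by omega)
        · exact Or.inr ⟨y, hy', hpos⟩

-- positivity of the counter at position j is exactly coverage of j.
theorem pv_reachstep_pos (fns : List String) (ps : List (List String)) (j : Nat) :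
    decide (0 < (pvGain fns ps j j).foldl max (pvReach fns ps j)) = pvCov fns ps j := by
  rw [pv_reach_incl, Bool.eq_iff_iff, decide_eq_true_eq, pv_foldmax_pos]
  simp only [lt_irrefl, false_or, List.mem_flatMap, pvGain, List.mem_filterMap, pvCov,
    List.any_eq_true, Bool.and_eq_true, decide_eq_true_eq, List.mem_range]
  constructor
  · rintro ⟨x, ⟨i, hi, p, hp, hfx⟩, hpos⟩
    rcases Decidable.em (pvOcc fns p i = true) with hocc | hocc
    · rw [if_pos hocc] at hfx
      obtain rfl : (i : Int) + p.length - j = x := by simpa using hfx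
      exact ⟨p, hp, i, hi, hocc, by omega⟩
    · rw [if_neg hocc] at hfx
      cases hfx
  · rintro ⟨p, hp, i, hi, hocc, hjm⟩
    exact ⟨(i : Int) + p.length - j, ⟨i, hi, p, hp, by rw [if_pos hocc]⟩, by omega⟩

-- the sweep invariant: B's fold from position j with counter pvReach j appends exactly the
-- covered-or-already-marked bits for positions j, j+1, …, n-1.
theorem pv_sweep (fns : List String) (ps : List (List String)) (fum : List Bool)
    (hl : fns.length ≤ fum.length) (k : Nat) :
    ∀ (j : Nat), j + k = fns.length → ∀ (out : List Bool),
    (PySem.List.pyRange (j : Int) ((fns.length : Int)) 1).foldl (fun (st : List Bool × Int) i =>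
      (st.1 ++ [decide (0 < ps.foldl (fun r p =>
          if ((p.length : Int) > r) ∧
              PySem.List.slice fns (some i) (some (i + (p.length : Int))) = p
          then (p.length : Int) else r) st.2) || (PySem.List.pyGet? fum i).getD false],
       max (ps.foldl (fun r p =>
          if ((p.length : Int) > r) ∧
              PySem.List.slice fns (some i) (some (i + (p.length : Int))) = p
          then (p.length : Int) else r) st.2 - 1) 0)) (out, pvReach fns ps j)
    = (out ++ (List.range' j k).map (fun t => pvCov fns ps t || fum.getD t false),
       pvReach fns ps fns.length) := by
  induction k with
  | zero =>
    intro j hj out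
    rw [PySem.List.pyRange_one_eq_nil (by omega)]
    simp only [List.foldl_nil, List.range'_zero, List.map_nil, List.append_nil]
    rw [show fns.length = j from by omega]
  | succ k ih =>
    intro j hj out
    have hjn : j < fns.length := by omega
    rw [PySem.List.pyRange_one_cons (by exact_mod_cast hjn)]
    simp only [List.foldl_cons]
    have hr : ps.foldl (fun r p =>
        if ((p.length : Int) > r) ∧
            PySem.List.slice fns (some ((j : Int))) (some ((j : Int) + (p.length : Int))) = p
        then (p.length : Int) else r) (pvReach fns ps j)
        = (pvGain fns ps j j).foldl max (pvReach fns ps j) := pv_inner fns ps j hjn _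
    have hget : (PySem.List.pyGet? fum ((j : Int))).getD false = fum.getD j false := by
      have h1 := PySem.List.pyGet?_eq_some_getElem fum (i := ((j : Int))) (by positivity) (by omega)
      rw [h1, Option.getD_some]
      exact (List.getD_eq_getElem fum false (by omega : j < fum.length)).symm
    have hcast : ((j : Int) + 1) = (((j + 1 : Nat)) : Int) := by push_cast; ring
    rw [hr, hget, pv_reachstep_pos fns ps j,
        show max ((pvGain fns ps j j).foldl max (pvReach fns ps j) - 1) 0
          = pvReach fns ps (j+1) from (pv_reach_succ fns ps j).symm,
        hcast, ih (j+1) (by omega) (out ++ [pvCov fns ps j || fum.getD j false]),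
        List.range'_succ]
    simp

-- coverage never reaches past the end of fns.
theorem pv_cov_ge (fns : List String) (ps : List (List String)) (j : Nat)
    (h : fns.length ≤ j) : pvCov fns ps j = false := by
  by_contra hne
  have hc : pvCov fns ps j = true := by
    revert hne
    cases pvCov fns ps j <;> simp
  simp only [pvCov, List.any_eq_true, Bool.and_eq_true, decide_eq_true_eq,
    List.mem_range] at hc
  obtain ⟨p, hp, i, hi, hocc, hjm⟩ := hc
  simp only [pvOcc, decide_eq_true_eq] at hocc
  omega

theorem pv_reach_zero (fns : List String) (ps : List (List String)) :
    pvReach fns ps 0 = 0 := by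
  simp [pvReach]

-- ===== VERDICT (by name: the statement is the Claim_ definition above) =====
theorem calc_score_subset_py_spec : Claim_equal_calc_score_subset_py := by
  intro fns ps fum _ hpre
  unfold Spec_calc_score_subset_py
  by_cases h1 : fns.length ≤ 1
  · simp [calc_score_subset_py, calc_score_subset_py_alt, h1]
  · have hl : fns.length ≤ fum.length := by
      rcases hpre with h | h
      · omega
      · exact h
    simp only [calc_score_subset_py, calc_score_subset_py_alt, if_neg h1]
    obtain ⟨hAlen, hAgetD⟩ := pv_progfold fns ps fum hl
    have hsweep := pv_sweep fns ps fum hl fns.length 0 (by omega) []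
    rw [pv_reach_zero] at hsweep
    simp only [Nat.cast_zero] at hsweep
    rw [hsweep]
    simp only [List.nil_append]
    rw [PySem.List.slice_from fum (by positivity),
        show ((fns.length : Int)).toNat = fns.length by omega]
    apply pvExt
    · rw [hAlen]
      simp only [List.length_append, List.length_map, List.length_range', List.length_drop]
      omega
    · intro j
      rw [hAgetD j]
      simp only [List.getD_eq_getElem?_getD]
      by_cases hj : j < fns.length
      · rw [List.getElem?_append_left (by simp; omega), List.getElem?_map]
        have : (List.range' 0 fns.length)[j]? = some j := by
          rw [List.getElem?_eq_getElem (by simpa using hj)]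
          simp
        rw [this]
        simp only [Option.map_some, Option.getD_some]
        rw [Bool.or_comm]
      · rw [List.getElem?_append_right (by simp; omega), List.getElem?_drop]
        simp only [List.length_map, List.length_range']
        rw [show fns.length + (j - fns.length) = j by omega,
            pv_cov_ge fns ps j (by omega)]
        simp
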